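-- pv_equiv track=rewrite | github.com/GJ2021-SSU/UPDATE | Utility.py | map_to_rect
-- ===== SOURCE A (Python) =====
-- def map_to_rect(col_map):
--     list_a = []
--     list_b = []
--     y = 0
--     for row in col_map:
--         x = 0
--         for tile in row:
--             if tile == '1':
--                 a = (x * 20, y * 20, 20, 20)
--                 list_a.append(a)
--             if tile == '2':
--                 b = (x * 20, y * 20, 20, 20)
--                 list_b.append(b)
--             x += 1
--         y += 1
--     return list_a, list_b
-- ===== SOURCE B (Python) =====
-- def map_to_rect(col_map):
--     table = [(tile, (x * 20, y * 20, 20, 20))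
--              for y, row in enumerate(col_map)
--              for x, tile in enumerate(row)]
--     list_a = [r for t, r in table if t == '1']
--     list_b = [r for t, r in table if t == '2']
--     return list_a, list_b
-- ===== Notes on version B (the rewrite author's own statement) =====
-- stated objective: alternative
-- what changed: B builds one flat tagged table of (tile, rect) pairs via enumerate in a single pass and then derives each result list by filtering the table, instead of A's nested loops with manual x/y counters and two conditional appends.
import Mathlib
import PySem

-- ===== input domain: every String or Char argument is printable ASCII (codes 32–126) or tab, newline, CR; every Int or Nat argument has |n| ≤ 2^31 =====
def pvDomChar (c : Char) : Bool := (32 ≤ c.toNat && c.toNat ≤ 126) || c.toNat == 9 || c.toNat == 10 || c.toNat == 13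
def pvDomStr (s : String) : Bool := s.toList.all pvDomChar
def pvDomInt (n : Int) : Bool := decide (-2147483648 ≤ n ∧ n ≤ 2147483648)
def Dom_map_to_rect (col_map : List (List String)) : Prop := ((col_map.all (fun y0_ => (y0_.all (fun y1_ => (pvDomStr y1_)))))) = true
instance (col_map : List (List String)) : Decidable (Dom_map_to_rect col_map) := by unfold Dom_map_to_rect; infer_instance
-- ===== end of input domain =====

-- ===== PORT A =====
-- literal port of A: nested foldl loops with accumulators list_a, list_b and counters x, y
def map_to_rect (col_map : List (List String)) : (List (Int × Int × Int × Int)) × (List (Int × Int × Int × Int)) :=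
  let st := col_map.foldl (fun (st : List (Int × Int × Int × Int) × List (Int × Int × Int × Int) × Int) row =>
    let st2 := row.foldl (fun (st2 : List (Int × Int × Int × Int) × List (Int × Int × Int × Int) × Int) tile =>
      let la := if tile == "1" then st2.1 ++ [(st2.2.2 * 20, st.2.2 * 20, 20, 20)] else st2.1
      let lb := if tile == "2" then st2.2.1 ++ [(st2.2.2 * 20, st.2.2 * 20, 20, 20)] else st2.2.1
      (la, lb, st2.2.2 + 1)) (st.1, st.2.1, 0)
    (st2.1, st2.2.1, st.2.2 + 1)) ([], [], 0)
  (st.1, st.2.1)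

-- ===== PORT B =====
-- literal port of B: one flat tagged table built with enumerate, then two filtering passes
def map_to_rect_alt (col_map : List (List String)) : (List (Int × Int × Int × Int)) × (List (Int × Int × Int × Int)) :=
  let table := (PySem.List.enumerate col_map).flatMap (fun yr =>
    (PySem.List.enumerate yr.2).map (fun xt => (xt.2, (xt.1 * 20, yr.1 * 20, (20 : Int), (20 : Int)))))
  let list_a := (table.filter (fun p => p.1 == "1")).map (fun p => p.2)
  let list_b := (table.filter (fun p => p.1 == "2")).map (fun p => p.2)
  (list_a, list_b)

-- ===== PRECONDITION & SPEC =====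
def Spec_map_to_rect (col_map : List (List String)) (out : (List (Int × Int × Int × Int)) × (List (Int × Int × Int × Int))) : Prop := out = map_to_rect_alt col_map
instance (col_map : List (List String)) (out : (List (Int × Int × Int × Int)) × (List (Int × Int × Int × Int))) : Decidable (Spec_map_to_rect col_map out) := by unfold Spec_map_to_rect; infer_instance

-- ===== CLAIM (what is proved, stated in full; the proofs are below) =====
def Claim_equal_map_to_rect : Prop := ∀ (col_map : List (List String)), Dom_map_to_rect col_map → Spec_map_to_rect col_map (map_to_rect col_map)

-- ===== LEMMAS AND PROOFS =====

-- the tagged table of one row, starting at column index x0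
def pvTbl (y x0 : Int) (row : List String) : List (String × (Int × Int × Int × Int)) :=
  (PySem.List.enumerate row x0).map (fun xt => (xt.2, (xt.1 * 20, y * 20, (20 : Int), (20 : Int))))

-- the tagged table of the whole grid, starting at row index y0
def pvTblAll (y0 : Int) (cm : List (List String)) : List (String × (Int × Int × Int × Int)) :=
  (PySem.List.enumerate cm y0).flatMap (fun yr => pvTbl yr.1 0 yr.2)

def pvSelA (t : List (String × (Int × Int × Int × Int))) : List (Int × Int × Int × Int) :=
  (t.filter (fun p => p.1 == "1")).map (fun p => p.2)

def pvSelB (t : List (String × (Int × Int × Int × Int))) : List (Int × Int × Int × Int) :=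
  (t.filter (fun p => p.1 == "2")).map (fun p => p.2)

theorem pvTbl_cons (y x0 : Int) (t : String) (ts : List String) :
    pvTbl y x0 (t :: ts) = (t, (x0 * 20, y * 20, 20, 20)) :: pvTbl y (x0 + 1) ts := by
  simp [pvTbl, PySem.List.enumerate_cons]

theorem pvTblAll_cons (y0 : Int) (r : List String) (rs : List (List String)) :
    pvTblAll y0 (r :: rs) = pvTbl y0 0 r ++ pvTblAll (y0 + 1) rs := by
  simp [pvTblAll, PySem.List.enumerate_cons]

theorem inner_fold (y : Int) (row : List String) :
    ∀ (la lb : List (Int × Int × Int × Int)) (x0 : Int),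
    row.foldl (fun (st2 : List (Int × Int × Int × Int) × List (Int × Int × Int × Int) × Int) tile =>
      let la := if tile == "1" then st2.1 ++ [(st2.2.2 * 20, y * 20, 20, 20)] else st2.1
      let lb := if tile == "2" then st2.2.1 ++ [(st2.2.2 * 20, y * 20, 20, 20)] else st2.2.1
      (la, lb, st2.2.2 + 1)) (la, lb, x0)
    = (la ++ pvSelA (pvTbl y x0 row), lb ++ pvSelB (pvTbl y x0 row), x0 + row.length) := by
  induction row with
  | nil => intro la lb x0; simp [pvTbl, pvSelA, pvSelB, PySem.List.enumerate]
  | cons t ts ih =>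
    intro la lb x0
    rw [List.foldl_cons]
    dsimp only
    rw [ih, pvTbl_cons]
    refine Prod.ext ?_ (Prod.ext ?_ ?_)
    · simp only [pvSelA, List.filter_cons]
      split_ifs <;> simp_all
    · simp only [pvSelB, List.filter_cons]
      split_ifs <;> simp_all
    · simp; omega

theorem outer_fold (cm : List (List String)) :
    ∀ (la lb : List (Int × Int × Int × Int)) (y0 : Int),
    cm.foldl (fun (st : List (Int × Int × Int × Int) × List (Int × Int × Int × Int) × Int) row =>
      let st2 := row.foldl (fun (st2 : List (Int × Int × Int × Int) × List (Int × Int × Int × Int) × Int) tile =>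
        let la := if tile == "1" then st2.1 ++ [(st2.2.2 * 20, st.2.2 * 20, 20, 20)] else st2.1
        let lb := if tile == "2" then st2.2.1 ++ [(st2.2.2 * 20, st.2.2 * 20, 20, 20)] else st2.2.1
        (la, lb, st2.2.2 + 1)) (st.1, st.2.1, 0)
      (st2.1, st2.2.1, st.2.2 + 1)) (la, lb, y0)
    = (la ++ pvSelA (pvTblAll y0 cm), lb ++ pvSelB (pvTblAll y0 cm), y0 + cm.length) := by
  induction cm with
  | nil => intro la lb y0; simp [pvTblAll, pvSelA, pvSelB, PySem.List.enumerate]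
  | cons r rs ih =>
    intro la lb y0
    rw [List.foldl_cons]
    dsimp only
    rw [inner_fold, ih, pvTblAll_cons]
    refine Prod.ext ?_ (Prod.ext ?_ ?_)
    · simp [pvSelA, List.filter_append]
    · simp [pvSelB, List.filter_append]
    · simp; omega

theorem alt_eq (cm : List (List String)) :
    map_to_rect_alt cm = (pvSelA (pvTblAll 0 cm), pvSelB (pvTblAll 0 cm)) := by
  simp [map_to_rect_alt, pvTblAll, pvTbl, pvSelA, pvSelB]

-- ===== VERDICT (by name: the statement is the Claim_ definition above) =====
theorem map_to_rect_spec : Claim_equal_map_to_rect := by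
  intro cm _
  unfold Spec_map_to_rect map_to_rect
  rw [alt_eq, outer_fold]
  simp
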